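-- pv_equiv track=rewrite | github.com/primecyberinfotec/cyberprimer | api/modules/web_info.py | check_cookies
-- ===== SOURCE A (Python) =====
-- def check_cookies(all_set_cookies: list) -> list:
--     """
--     CORREÇÃO Bug 3: analisa flags de segurança em TODOS os cookies da resposta.
--
--     Antes: buscava apenas o primeiro Set-Cookie via next() no dict de headers,
--     deixando todos os outros cookies sem análise — um site com session + csrf
--     + tracking cookies teria apenas o primeiro verificado.
--
--     Fix: recebe a lista completa de valores Set-Cookie e analisa cada um.
--     """
--     issues = []
--
--     if not all_set_cookies:
--         return issues
--
--     for cookie_header in all_set_cookies: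
--         # Extrai nome do cookie para contexto no log
--         cookie_name = cookie_header.split("=")[0].strip() if "=" in cookie_header else "?"
--
--         if "HttpOnly" not in cookie_header:
--             issues.append({
--                 "risk": "medium",
--                 "msg":  f"Cookie '{cookie_name}' sem flag HttpOnly — acessível via JavaScript",
--             })
--         if "Secure" not in cookie_header:
--             issues.append({
--                 "risk": "medium",
--                 "msg":  f"Cookie '{cookie_name}' sem flag Secure — pode ser enviado em HTTP",
--             })
--         if "SameSite" not in cookie_header:
--             issues.append({
--                 "risk": "low",
--                 "msg":  f"Cookie '{cookie_name}' sem SameSite — risco de CSRF",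
--             })
--
--     # Deduplica mensagens idênticas (vários cookies com mesmo problema)
--     seen = set()
--     deduped = []
--     for issue in issues:
--         key = issue["msg"]
--         if key not in seen:
--             seen.add(key)
--             deduped.append(issue)
--
--     return deduped
-- ===== SOURCE B (Python) =====
-- def check_cookies(all_set_cookies: list) -> list:
--     """Single pass: emit each issue at most once via a maintained `seen` set,
--     instead of building a full issue list and deduplicating it afterwards."""
--     out = []
--     seen = set()
--     for cookie_header in all_set_cookies:
--         cookie_name = cookie_header.split("=")[0].strip() if "=" in cookie_header else "?"
--
--         if "HttpOnly" not in cookie_header: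
--             msg = f"Cookie '{cookie_name}' sem flag HttpOnly — acessível via JavaScript"
--             if msg not in seen:
--                 seen.add(msg)
--                 out.append({"risk": "medium", "msg": msg})
--         if "Secure" not in cookie_header:
--             msg = f"Cookie '{cookie_name}' sem flag Secure — pode ser enviado em HTTP"
--             if msg not in seen:
--                 seen.add(msg)
--                 out.append({"risk": "medium", "msg": msg})
--         if "SameSite" not in cookie_header:
--             msg = f"Cookie '{cookie_name}' sem SameSite — risco de CSRF"
--             if msg not in seen:
--                 seen.add(msg)
--                 out.append({"risk": "low", "msg": msg})
--     return out
-- ===== Notes on version B (the rewrite author's own statement) =====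
-- stated objective: faster
-- what changed: One fused pass that appends an issue only if its message is new (seen-set maintained inline), replacing A's two-phase build-all-issues-then-dedup structure; the full intermediate issues list and the second dedup loop with its dict key lookups disappear.
import Mathlib
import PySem

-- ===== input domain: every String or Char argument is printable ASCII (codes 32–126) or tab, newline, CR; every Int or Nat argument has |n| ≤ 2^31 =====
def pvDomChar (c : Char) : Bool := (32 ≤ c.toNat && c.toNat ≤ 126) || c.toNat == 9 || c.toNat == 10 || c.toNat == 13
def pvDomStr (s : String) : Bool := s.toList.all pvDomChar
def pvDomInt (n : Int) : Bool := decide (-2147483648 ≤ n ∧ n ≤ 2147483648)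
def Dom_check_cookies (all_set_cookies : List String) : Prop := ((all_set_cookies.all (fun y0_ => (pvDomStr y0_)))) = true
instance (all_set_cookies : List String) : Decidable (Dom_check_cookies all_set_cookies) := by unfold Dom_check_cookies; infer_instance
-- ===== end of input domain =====

-- B fuses A's build-then-dedup two-phase structure into one pass with an inline seen-set; same output.

-- ===== PORT A =====
def check_cookies (all_set_cookies : List String) : List (List (String × String)) :=
  if all_set_cookies.isEmpty then [] else
  let issues := all_set_cookies.foldl (fun issues cookie_header =>
    let cookie_name := if PySem.Str.isIn "=" cookie_header
      then PySem.Str.strip (((PySem.Str.split? cookie_header "=").getD []).headD "")  -- split("=") is nonempty, [0] = head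
      else "?"
    let issues := if !(PySem.Str.isIn "HttpOnly" cookie_header)
      then issues ++ [[("risk", "medium"), ("msg", "Cookie '" ++ cookie_name ++ "' sem flag HttpOnly — acessível via JavaScript")]]
      else issues
    let issues := if !(PySem.Str.isIn "Secure" cookie_header)
      then issues ++ [[("risk", "medium"), ("msg", "Cookie '" ++ cookie_name ++ "' sem flag Secure — pode ser enviado em HTTP")]]
      else issues
    let issues := if !(PySem.Str.isIn "SameSite" cookie_header)
      then issues ++ [[("risk", "low"), ("msg", "Cookie '" ++ cookie_name ++ "' sem SameSite — risco de CSRF")]]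
      else issues
    issues) []
  -- dedup loop; issue["msg"] always succeeds here (every appended dict has a "msg" key)
  let p := issues.foldl (fun (p : PySem.Set String × List (List (String × String))) issue =>
      let key := ((PySem.Dict.mk issue).get? "msg").getD ""
      if PySem.Set.contains p.1 key then p else (PySem.Set.add p.1 key, p.2 ++ [issue]))
    (PySem.Set.empty, [])
  p.2

-- ===== PORT B =====
def check_cookies_alt (all_set_cookies : List String) : List (List (String × String)) :=
  (all_set_cookies.foldl (fun (st : PySem.Set String × List (List (String × String))) cookie_header =>
    let cookie_name := if PySem.Str.isIn "=" cookie_header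
      then PySem.Str.strip (((PySem.Str.split? cookie_header "=").getD []).headD "")
      else "?"
    let st := if !(PySem.Str.isIn "HttpOnly" cookie_header) then
        let msg := "Cookie '" ++ cookie_name ++ "' sem flag HttpOnly — acessível via JavaScript"
        if PySem.Set.contains st.1 msg then st
        else (PySem.Set.add st.1 msg, st.2 ++ [[("risk", "medium"), ("msg", msg)]])
      else st
    let st := if !(PySem.Str.isIn "Secure" cookie_header) then
        let msg := "Cookie '" ++ cookie_name ++ "' sem flag Secure — pode ser enviado em HTTP"
        if PySem.Set.contains st.1 msg then st
        else (PySem.Set.add st.1 msg, st.2 ++ [[("risk", "medium"), ("msg", msg)]])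
      else st
    let st := if !(PySem.Str.isIn "SameSite" cookie_header) then
        let msg := "Cookie '" ++ cookie_name ++ "' sem SameSite — risco de CSRF"
        if PySem.Set.contains st.1 msg then st
        else (PySem.Set.add st.1 msg, st.2 ++ [[("risk", "low"), ("msg", msg)]])
      else st
    st) (PySem.Set.empty, [])).2

-- ===== PRECONDITION & SPEC =====
def Spec_check_cookies (all_set_cookies : List String) (out : List (List (String × String))) : Prop := out = check_cookies_alt all_set_cookies
instance (all_set_cookies : List String) (out : List (List (String × String))) : Decidable (Spec_check_cookies all_set_cookies out) := by unfold Spec_check_cookies; infer_instance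

-- ===== CLAIM (what is proved, stated in full; the proofs are below) =====
def Claim_equal_check_cookies : Prop := ∀ (all_set_cookies : List String), Dom_check_cookies all_set_cookies → Spec_check_cookies all_set_cookies (check_cookies all_set_cookies)

-- ===== LEMMAS AND PROOFS =====

-- the issues A's first loop generates for one cookie header
def pvItems (h : String) : List (List (String × String)) :=
  let name := if PySem.Str.isIn "=" h
    then PySem.Str.strip (((PySem.Str.split? h "=").getD []).headD "") else "?"
  (if !(PySem.Str.isIn "HttpOnly" h)
    then [[("risk", "medium"), ("msg", "Cookie '" ++ name ++ "' sem flag HttpOnly — acessível via JavaScript")]] else []) ++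
  (if !(PySem.Str.isIn "Secure" h)
    then [[("risk", "medium"), ("msg", "Cookie '" ++ name ++ "' sem flag Secure — pode ser enviado em HTTP")]] else []) ++
  (if !(PySem.Str.isIn "SameSite" h)
    then [[("risk", "low"), ("msg", "Cookie '" ++ name ++ "' sem SameSite — risco de CSRF")]] else [])

-- A's dedup step
def pvDStep (p : PySem.Set String × List (List (String × String))) (issue : List (String × String)) :
    PySem.Set String × List (List (String × String)) :=
  let key := ((PySem.Dict.mk issue).get? "msg").getD ""
  if PySem.Set.contains p.1 key then p else (PySem.Set.add p.1 key, p.2 ++ [issue])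

lemma pvA_body (acc : List (List (String × String))) (h : String) :
    (let cookie_name := if PySem.Str.isIn "=" h
        then PySem.Str.strip (((PySem.Str.split? h "=").getD []).headD "") else "?"
      let issues := if !(PySem.Str.isIn "HttpOnly" h)
        then acc ++ [[("risk", "medium"), ("msg", "Cookie '" ++ cookie_name ++ "' sem flag HttpOnly — acessível via JavaScript")]] else acc
      let issues := if !(PySem.Str.isIn "Secure" h)
        then issues ++ [[("risk", "medium"), ("msg", "Cookie '" ++ cookie_name ++ "' sem flag Secure — pode ser enviado em HTTP")]] else issues
      let issues := if !(PySem.Str.isIn "SameSite" h)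
        then issues ++ [[("risk", "low"), ("msg", "Cookie '" ++ cookie_name ++ "' sem SameSite — risco de CSRF")]] else issues
      issues) = acc ++ pvItems h := by
  simp only [pvItems]
  split_ifs <;> simp

lemma pvB_body (st : PySem.Set String × List (List (String × String))) (h : String) :
    (let cookie_name := if PySem.Str.isIn "=" h
        then PySem.Str.strip (((PySem.Str.split? h "=").getD []).headD "") else "?"
      let st := if !(PySem.Str.isIn "HttpOnly" h) then
          let msg := "Cookie '" ++ cookie_name ++ "' sem flag HttpOnly — acessível via JavaScript"
          if PySem.Set.contains st.1 msg then st
          else (PySem.Set.add st.1 msg, st.2 ++ [[("risk", "medium"), ("msg", msg)]])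
        else st
      let st := if !(PySem.Str.isIn "Secure" h) then
          let msg := "Cookie '" ++ cookie_name ++ "' sem flag Secure — pode ser enviado em HTTP"
          if PySem.Set.contains st.1 msg then st
          else (PySem.Set.add st.1 msg, st.2 ++ [[("risk", "medium"), ("msg", msg)]])
        else st
      let st := if !(PySem.Str.isIn "SameSite" h) then
          let msg := "Cookie '" ++ cookie_name ++ "' sem SameSite — risco de CSRF"
          if PySem.Set.contains st.1 msg then st
          else (PySem.Set.add st.1 msg, st.2 ++ [[("risk", "low"), ("msg", msg)]])
        else st
      st) = (pvItems h).foldl pvDStep st := by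
  cases h0 : PySem.Str.isIn "=" h <;> cases h1 : PySem.Str.isIn "HttpOnly" h <;>
    cases h2 : PySem.Str.isIn "Secure" h <;> cases h3 : PySem.Str.isIn "SameSite" h <;>
    simp at h0 h1 h2 h3 <;>
    simp [pvItems, h0, h1, h2, h3, pvDStep, PySem.Dict.get?_mk_cons]

lemma pvFoldl_flat (xs : List String) (st : PySem.Set String × List (List (String × String))) :
    xs.foldl (fun st h => (pvItems h).foldl pvDStep st) st
      = (xs.flatMap pvItems).foldl pvDStep st := by
  induction xs generalizing st with
  | nil => rfl
  | cons h t ih => simp [List.foldl_append, ih]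

-- ===== VERDICT (by name: the statement is the Claim_ definition above) =====
theorem check_cookies_spec : Claim_equal_check_cookies := by
  intro xs _
  unfold Spec_check_cookies check_cookies check_cookies_alt
  by_cases hx : xs = []
  · subst hx; rfl
  · rw [if_neg (by simpa using hx)]
    have hA : (fun (issues : List (List (String × String))) (cookie_header : String) =>
        let cookie_name := if PySem.Str.isIn "=" cookie_header
          then PySem.Str.strip (((PySem.Str.split? cookie_header "=").getD []).headD "") else "?"
        let issues := if !(PySem.Str.isIn "HttpOnly" cookie_header)
          then issues ++ [[("risk", "medium"), ("msg", "Cookie '" ++ cookie_name ++ "' sem flag HttpOnly — acessível via JavaScript")]] else issues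
        let issues := if !(PySem.Str.isIn "Secure" cookie_header)
          then issues ++ [[("risk", "medium"), ("msg", "Cookie '" ++ cookie_name ++ "' sem flag Secure — pode ser enviado em HTTP")]] else issues
        let issues := if !(PySem.Str.isIn "SameSite" cookie_header)
          then issues ++ [[("risk", "low"), ("msg", "Cookie '" ++ cookie_name ++ "' sem SameSite — risco de CSRF")]] else issues
        issues) = (fun acc h => acc ++ pvItems h) :=
      funext fun acc => funext fun h => pvA_body acc h
    have hB : (fun (st : PySem.Set String × List (List (String × String))) (cookie_header : String) =>
        let cookie_name := if PySem.Str.isIn "=" cookie_header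
          then PySem.Str.strip (((PySem.Str.split? cookie_header "=").getD []).headD "") else "?"
        let st := if !(PySem.Str.isIn "HttpOnly" cookie_header) then
            let msg := "Cookie '" ++ cookie_name ++ "' sem flag HttpOnly — acessível via JavaScript"
            if PySem.Set.contains st.1 msg then st
            else (PySem.Set.add st.1 msg, st.2 ++ [[("risk", "medium"), ("msg", msg)]])
          else st
        let st := if !(PySem.Str.isIn "Secure" cookie_header) then
            let msg := "Cookie '" ++ cookie_name ++ "' sem flag Secure — pode ser enviado em HTTP"
            if PySem.Set.contains st.1 msg then st
            else (PySem.Set.add st.1 msg, st.2 ++ [[("risk", "medium"), ("msg", msg)]])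
          else st
        let st := if !(PySem.Str.isIn "SameSite" cookie_header) then
            let msg := "Cookie '" ++ cookie_name ++ "' sem SameSite — risco de CSRF"
            if PySem.Set.contains st.1 msg then st
            else (PySem.Set.add st.1 msg, st.2 ++ [[("risk", "low"), ("msg", msg)]])
          else st
        st) = (fun st h => (pvItems h).foldl pvDStep st) :=
      funext fun st => funext fun h => pvB_body st h
    rw [hA, hB, pvFoldl_flat]
    rw [show (fun (p : PySem.Set String × List (List (String × String)))
          (issue : List (String × String)) =>
        let key := ((PySem.Dict.mk issue).get? "msg").getD ""
        if PySem.Set.contains p.1 key then p else (PySem.Set.add p.1 key, p.2 ++ [issue]))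
        = pvDStep from rfl]
    rw [PySem.List.foldl_append_eq_flatMap, List.nil_append]
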